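-- pv_equiv track=rewrite | github.com/nbalance97/Programmers | LV 2/[ Lv 2 ] 후보키.py | check_in_set
-- ===== SOURCE A (Python) =====
-- from itertools import combinations
--
-- def check_in_set(candidate, case):
--     case_len = len(case)
--
--     for i in range(1, case_len+1):
--         total_case = list(combinations(case, i))
--         for case_ in total_case:
--             if case_ in candidate:
--                 return False
--     return True
-- ===== SOURCE B (Python) =====
-- def _is_subseq(sub, seq):
--     # two-pointer: does sub occur in seq in order?
--     it = iter(seq)
--     return all(x in it for x in sub)
--
-- def check_in_set(candidate, case):
--     for cand in candidate:
--         if cand and _is_subseq(cand, case):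
--             return False
--     return True
-- ===== Notes on version B (the rewrite author's own statement) =====
-- stated objective: faster
-- what changed: Instead of enumerating all 2^n-1 nonempty combinations of case and testing each for membership in candidate, B scans candidate once and tests each tuple with a linear two-pointer subsequence check.
import Mathlib
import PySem

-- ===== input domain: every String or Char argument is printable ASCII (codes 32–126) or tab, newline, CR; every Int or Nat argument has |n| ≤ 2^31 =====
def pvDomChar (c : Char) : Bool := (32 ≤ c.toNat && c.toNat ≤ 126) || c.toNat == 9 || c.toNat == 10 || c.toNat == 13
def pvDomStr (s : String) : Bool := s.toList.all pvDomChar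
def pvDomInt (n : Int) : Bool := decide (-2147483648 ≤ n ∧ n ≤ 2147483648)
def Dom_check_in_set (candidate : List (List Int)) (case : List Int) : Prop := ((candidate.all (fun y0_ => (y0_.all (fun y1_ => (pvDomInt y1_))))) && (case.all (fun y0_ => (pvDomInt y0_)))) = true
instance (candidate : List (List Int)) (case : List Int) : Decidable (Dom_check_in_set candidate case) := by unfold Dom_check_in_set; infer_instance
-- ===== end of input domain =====

-- B replaces A's enumeration of all nonempty combinations of `case` with a single scan of
-- `candidate`, testing each tuple by a linear two-pointer subsequence check (objective: faster).

-- ===== PORT A =====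
-- for i in range(1, case_len+1): for case_ in combinations(case, i): if case_ in candidate: return False
-- (the early 'return False' is rendered as the Boolean 'all' over the same traversal)
def check_in_set (candidate : List (List Int)) (case : List Int) : Bool :=
  let case_len := case.length
  (List.range' 1 case_len).all (fun i =>
    (PySem.List.combinations case i).all (fun case_ => !(candidate.contains case_)))

-- ===== PORT B =====
-- two-pointer greedy subsequence test (Source B's _is_subseq)
def isSubseqB : List Int → List Int → Bool
  | [], _ => true
  | _ :: _, [] => false
  | a :: as_, b :: bs => if a = b then isSubseqB as_ bs else isSubseqB (a :: as_) bs

def check_in_set_alt (candidate : List (List Int)) (case : List Int) : Bool :=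
  candidate.all (fun cand => !(!cand.isEmpty && isSubseqB cand case))

-- ===== PRECONDITION & SPEC =====
def Spec_check_in_set (candidate : List (List Int)) (case : List Int) (out : Bool) : Prop := out = check_in_set_alt candidate case
instance (candidate : List (List Int)) (case : List Int) (out : Bool) : Decidable (Spec_check_in_set candidate case out) := by unfold Spec_check_in_set; infer_instance

-- ===== CLAIM (what is proved, stated in full; the proofs are below) =====
def Claim_equal_check_in_set : Prop := ∀ (candidate : List (List Int)) (case : List Int), Dom_check_in_set candidate case → Spec_check_in_set candidate case (check_in_set candidate case)

-- ===== LEMMAS AND PROOFS =====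

-- greedy two-pointer test decides the sublist (ordered subsequence) relation
theorem isSubseqB_iff_sublist (c xs : List Int) : isSubseqB c xs = true ↔ c.Sublist xs := by
  induction xs generalizing c with
  | nil =>
    cases c with
    | nil => simp [isSubseqB]
    | cons a as_ => simp [isSubseqB]
  | cons b bs ih =>
    cases c with
    | nil => simp [isSubseqB]
    | cons a as_ =>
      by_cases h : a = b
      · subst h
        simp [isSubseqB, ih]
      · simp only [isSubseqB, if_neg h, ih]
        constructor
        · intro hs; exact hs.cons b
        · intro hs
          rcases List.sublist_cons_iff.mp hs with hs' | ⟨r, hr, _⟩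
          · exact hs'
          · injection hr with h1 _
            exact absurd h1 h

theorem isSubseqB_eq_false (c xs : List Int) : isSubseqB c xs = false ↔ ¬ c.Sublist xs := by
  rw [← isSubseqB_iff_sublist]
  cases h : isSubseqB c xs <;> simp

theorem check_in_set_spec : Claim_equal_check_in_set := by
  intro candidate case _
  show check_in_set candidate case = check_in_set_alt candidate case
  unfold check_in_set check_in_set_alt
  rw [Bool.eq_iff_iff]
  simp only [List.all_eq_true, List.mem_range', PySem.List.mem_combinations_iff,
    List.contains_eq_mem, Bool.not_eq_true', Bool.and_eq_false_iff, Bool.not_eq_false',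
    List.isEmpty_iff, isSubseqB_eq_false, decide_eq_false_iff_not]
  constructor
  · intro h cand hcand
    by_cases hne : cand = []
    · left; exact hne
    · right; intro hsl
      have hlen1 : 1 ≤ cand.length := by
        cases cand with
        | nil => exact absurd rfl hne
        | cons x t => simp
      have hle : cand.length ≤ case.length := hsl.length_le
      exact h cand.length ⟨cand.length - 1, by omega, by omega⟩ cand ⟨hsl, rfl⟩ hcand
  · intro h i hi c hc hmem
    obtain ⟨hsl, hlen⟩ := hc
    obtain ⟨j, hj, hij⟩ := hi
    rcases h c hmem with hnil | hns
    · subst hnil; simp at hlen; omega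
    · exact hns hsl
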